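-- pv_equiv track=rewrite | github.com/lxchub-inst/ALP | bemol_corriger.py | gamme_diese
-- ===== SOURCE A (Python) =====
-- GAMME_BASE = ["do", "ré", "mi", "fa", "sol", "la", "si"]
--
-- SAUT = 4
--
-- def gamme_diese(nb_alt):
--     i = 0
--     note = ""
--     while nb_alt > 0:
--         if (i + SAUT) < len(GAMME_BASE):
--             i = i + SAUT
--         else:
--             i = i + SAUT - len(GAMME_BASE)
--
--         note = GAMME_BASE[i]
--         nb_alt = nb_alt - 1
--
--     return note
-- ===== SOURCE B (Python) =====
-- GAMME_BASE = ["do", "ré", "mi", "fa", "sol", "la", "si"]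
--
-- SAUT = 4
--
-- def gamme_diese(nb_alt):
--     if nb_alt <= 0:
--         return ""
--     return GAMME_BASE[(SAUT * nb_alt) % len(GAMME_BASE)]
-- ===== Notes on version B (the rewrite author's own statement) =====
-- stated objective: faster
-- what changed: Replaces the step-by-step while loop over the scale with a direct closed-form modular index GAMME_BASE[(4*nb_alt) % 7] (empty string for nb_alt <= 0).
import Mathlib
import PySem

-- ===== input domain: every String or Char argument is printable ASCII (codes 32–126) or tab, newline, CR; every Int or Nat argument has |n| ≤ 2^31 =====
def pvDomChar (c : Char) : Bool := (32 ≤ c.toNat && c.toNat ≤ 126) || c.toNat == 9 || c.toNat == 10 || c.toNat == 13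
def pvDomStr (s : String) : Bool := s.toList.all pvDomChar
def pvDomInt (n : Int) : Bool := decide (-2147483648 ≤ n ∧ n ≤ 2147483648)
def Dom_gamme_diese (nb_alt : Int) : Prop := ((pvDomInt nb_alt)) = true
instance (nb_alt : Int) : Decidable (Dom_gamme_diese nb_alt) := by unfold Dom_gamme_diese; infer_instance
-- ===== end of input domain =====

-- B replaces A's O(nb_alt) while loop with the closed-form index GAMME_BASE[(4*nb_alt) % 7]; measurably faster on large nb_alt.

-- ===== PORT A =====
def pvGAMME_BASE : List String := ["do", "ré", "mi", "fa", "sol", "la", "si"]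

def pvSAUT : Int := 4

-- the while loop of A: state (nb_alt, i, note)
def pvLoopA (nb_alt : Int) (i : Int) (note : String) : String :=
  if h : nb_alt > 0 then
    let i' := if i + pvSAUT < (pvGAMME_BASE.length : Int) then i + pvSAUT
              else i + pvSAUT - (pvGAMME_BASE.length : Int)
    pvLoopA (nb_alt - 1) i' ((PySem.List.pyGet? pvGAMME_BASE i').getD note)
  else note
  termination_by nb_alt.toNat
  decreasing_by omega

def gamme_diese (nb_alt : Int) : String := pvLoopA nb_alt 0 ""

-- ===== PORT B =====
def gamme_diese_alt (nb_alt : Int) : String :=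
  if nb_alt ≤ 0 then ""
  else (PySem.List.pyGet? pvGAMME_BASE (PySem.Int.mod (pvSAUT * nb_alt) (pvGAMME_BASE.length : Int))).getD ""

-- ===== PRECONDITION & SPEC =====
def Spec_gamme_diese (nb_alt : Int) (out : String) : Prop := out = gamme_diese_alt nb_alt
instance (nb_alt : Int) (out : String) : Decidable (Spec_gamme_diese nb_alt out) := by unfold Spec_gamme_diese; infer_instance

-- ===== CLAIM (what is proved, stated in full; the proofs are below) =====
def Claim_equal_gamme_diese : Prop := ∀ (nb_alt : Int), Dom_gamme_diese nb_alt → Spec_gamme_diese nb_alt (gamme_diese nb_alt)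

-- ===== LEMMAS AND PROOFS =====

theorem pvLen_base : ((pvGAMME_BASE.length : Nat) : Int) = 7 := by rfl

theorem pvGet_base_isSome (j : Int) (h0 : 0 ≤ j) (h7 : j < 7) :
    (PySem.List.pyGet? pvGAMME_BASE j).isSome := by
  rw [Option.isSome_iff_ne_none]
  intro hnone
  rw [PySem.List.pyGet?_eq_none_iff] at hnone
  exact hnone (by simp only [PySem.Raise.InRange, pvGAMME_BASE]; constructor <;> [omega; simpa using h7])

theorem pvGetD_irrel (j : Int) (h0 : 0 ≤ j) (h7 : j < 7) (a b : String) :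
    (PySem.List.pyGet? pvGAMME_BASE j).getD a = (PySem.List.pyGet? pvGAMME_BASE j).getD b := by
  obtain ⟨v, hv⟩ := Option.isSome_iff_exists.mp (pvGet_base_isSome j h0 h7)
  simp [hv]

-- the loop invariant: from state (n+1, i, note) with 0 ≤ i < 7 the loop ends at GAMME_BASE[(i + 4*(n+1)) % 7]
theorem pvLoopA_eq (n : Nat) : ∀ (i : Int) (note : String), 0 ≤ i → i < 7 →
    pvLoopA ((n : Int) + 1) i note
      = (PySem.List.pyGet? pvGAMME_BASE ((i + 4 * ((n : Int) + 1)) % 7)).getD "" := by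
  induction n with
  | zero =>
    intro i note h0 h7
    rw [pvLoopA]
    rw [dif_pos (by omega : ((0:Nat) : Int) + 1 > 0)]
    rw [pvLoopA]
    rw [dif_neg (by omega : ¬ (((0:Nat) : Int) + 1 - 1 > 0))]
    have hidx : (if i + pvSAUT < ((pvGAMME_BASE.length : Nat) : Int) then i + pvSAUT
        else i + pvSAUT - ((pvGAMME_BASE.length : Nat) : Int)) = (i + 4 * (((0:Nat) : Int) + 1)) % 7 := by
      rw [pvLen_base]; simp only [pvSAUT]
      split_ifs with hlt <;> push_cast <;> omega
    rw [hidx]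
    exact pvGetD_irrel _ (by push_cast; omega) (by push_cast; omega) note ""
  | succ m ih =>
    intro i note h0 h7
    rw [pvLoopA]
    rw [dif_pos (by push_cast; omega : (((m+1 : Nat) : Int) + 1) > 0)]
    have hidx : (if i + pvSAUT < ((pvGAMME_BASE.length : Nat) : Int) then i + pvSAUT
        else i + pvSAUT - ((pvGAMME_BASE.length : Nat) : Int)) = (i + 4) % 7 := by
      rw [pvLen_base]; simp only [pvSAUT]
      split_ifs with hlt <;> omega
    have hcast : (((m+1 : Nat) : Int) + 1 - 1) = (m : Int) + 1 := by push_cast; omega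
    rw [hidx, hcast, ih ((i + 4) % 7) _ (by omega) (by omega)]
    have hmod : ((i + 4) % 7 + 4 * ((m : Int) + 1)) % 7 = (i + 4 * (((m+1 : Nat) : Int) + 1)) % 7 := by
      push_cast; omega
    rw [hmod]

theorem pvLoopA_nonpos (nb_alt : Int) (h : ¬ nb_alt > 0) : pvLoopA nb_alt 0 "" = "" := by
  rw [pvLoopA]; simp [h]

-- ===== VERDICT (by name: the statement is the Claim_ definition above) =====
theorem gamme_diese_spec : Claim_equal_gamme_diese := by
  intro nb_alt _
  unfold Spec_gamme_diese gamme_diese gamme_diese_alt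
  by_cases h : nb_alt ≤ 0
  · simp only [if_pos h]
    exact pvLoopA_nonpos nb_alt (by omega)
  · simp only [if_neg h]
    obtain ⟨n, hn⟩ : ∃ n : Nat, nb_alt = (n : Int) + 1 := ⟨(nb_alt - 1).toNat, by omega⟩
    subst hn
    rw [pvLoopA_eq n 0 "" (by omega) (by omega)]
    rw [PySem.Int.mod_eq_emod_of_pos (by rw [pvLen_base]; omega)]
    rw [pvLen_base]
    have hix : (0 + 4 * ((n : Int) + 1)) % 7 = (pvSAUT * ((n : Int) + 1)) % 7 := by
      simp only [pvSAUT]; omega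
    rw [hix]
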